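-- pv_equiv track=rewrite | github.com/AJ-Gonzalez/NapkinWire | ticket_summary.py | group_tickets_by_status
-- ===== SOURCE A (Python) =====
-- from collections import defaultdict
--
-- def group_tickets_by_status(tickets):
--     """Group tickets by status and sort by priority within each group."""
--     priority_order = {'high': 0, 'medium': 1, 'low': 2}
--     grouped = defaultdict(list)
--
--     for ticket in tickets:
--         status = ticket.get('status', 'unknown')
--         grouped[status].append(ticket)
--
--     # Sort each group by priority
--     for status in grouped:
--         grouped[status].sort(key=lambda t: priority_order.get(t.get('priority', 'low'), 3))
--
--     return dict(grouped)
-- ===== SOURCE B (Python) =====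
-- def group_tickets_by_status(tickets):
--     """Group tickets by status and sort by priority within each group."""
--     priority_order = {'high': 0, 'medium': 1, 'low': 2}
--     grouped = {}
--     # fix the key order to first appearance in the original list
--     for ticket in tickets:
--         grouped.setdefault(ticket.get('status', 'unknown'), [])
--     # one global stable sort by priority, then a single grouping pass
--     for ticket in sorted(tickets, key=lambda t: priority_order.get(t.get('priority', 'low'), 3)):
--         grouped[ticket.get('status', 'unknown')].append(ticket)
--     return grouped
-- ===== Notes on version B (the rewrite author's own statement) =====
-- stated objective: alternative
-- what changed: Replaces per-group in-place sorts after a defaultdict grouping pass by one global stable sort of all tickets by priority followed by a single grouping pass (key order fixed beforehand by a setdefault seeding pass); correctness rests on stable sort commuting with filtering by status.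
import Mathlib
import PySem

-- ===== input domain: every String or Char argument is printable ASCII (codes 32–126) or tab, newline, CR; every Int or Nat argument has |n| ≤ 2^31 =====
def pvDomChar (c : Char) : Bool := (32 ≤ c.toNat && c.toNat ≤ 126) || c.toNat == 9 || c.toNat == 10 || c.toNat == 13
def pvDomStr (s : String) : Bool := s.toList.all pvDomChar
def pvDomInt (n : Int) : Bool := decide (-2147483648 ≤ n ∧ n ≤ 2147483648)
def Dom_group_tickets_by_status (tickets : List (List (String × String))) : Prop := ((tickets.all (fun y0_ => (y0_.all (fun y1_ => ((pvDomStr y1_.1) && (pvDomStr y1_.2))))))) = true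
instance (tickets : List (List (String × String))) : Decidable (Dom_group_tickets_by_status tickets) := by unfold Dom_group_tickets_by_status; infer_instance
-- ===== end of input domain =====

-- B replaces A's per-group in-place sorts after a defaultdict grouping pass by ONE global
-- stable sort by priority followed by a single grouping pass (key order seeded first);
-- an alternative decomposition, return values proved equal.

-- ===== PORT A =====
-- ticket.get('status', 'unknown')  (a ticket is a Python dict; first-match lookup)
def pvStatus (t : List (String × String)) : String :=
  (PySem.Dict.mk t).getD "status" "unknown"

-- priority_order.get(ticket.get('priority', 'low'), 3)
def pvPrio (t : List (String × String)) : Int :=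
  (PySem.Dict.ofList [("high", (0 : Int)), ("medium", 1), ("low", 2)]).getD
    ((PySem.Dict.mk t).getD "priority" "low") 3

def group_tickets_by_status (tickets : List (List (String × String))) :
    List (String × List (List (String × String))) :=
  -- for ticket in tickets: grouped[status].append(ticket)   (defaultdict(list))
  let grouped := tickets.foldl
    (fun d t => d.modify (pvStatus t) [] (fun v => v ++ [t])) PySem.Dict.empty
  -- for status in grouped: grouped[status].sort(key=...)   (key always present)
  let sortedG := grouped.keys.foldl
    (fun d s => d.modify s [] (fun v => PySem.List.sorted v pvPrio)) grouped
  -- return dict(grouped)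
  sortedG.items

-- ===== PORT B =====
def group_tickets_by_status_alt (tickets : List (List (String × String))) :
    List (String × List (List (String × String))) :=
  -- for ticket in tickets: grouped.setdefault(status, [])
  let seeded := tickets.foldl
    (fun d t => d.setdefault (pvStatus t) []) PySem.Dict.empty
  -- for ticket in sorted(tickets, key=...): grouped[status].append(ticket)  (key always present)
  let final := (PySem.List.sorted tickets pvPrio).foldl
    (fun d t => d.modify (pvStatus t) [] (fun v => v ++ [t])) seeded
  final.items

-- ===== PRECONDITION & SPEC =====
def Spec_group_tickets_by_status (tickets : List (List (String × String))) (out : List (String × List (List (String × String)))) : Prop := out = group_tickets_by_status_alt tickets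
instance (tickets : List (List (String × String))) (out : List (String × List (List (String × String)))) : Decidable (Spec_group_tickets_by_status tickets out) := by unfold Spec_group_tickets_by_status; infer_instance

-- ===== CLAIM (what is proved, stated in full; the proofs are below) =====
def Claim_equal_group_tickets_by_status : Prop := ∀ (tickets : List (List (String × String))), Dom_group_tickets_by_status tickets → Spec_group_tickets_by_status tickets (group_tickets_by_status tickets)

-- ===== LEMMAS AND PROOFS =====

theorem pv_insertBy_cons {α : Type} (b : α → α → Bool) (x y : α) (ys : List α) :
    PySem.List.insertBy b x (y :: ys)
      = if b x y then x :: y :: ys else y :: PySem.List.insertBy b x ys := rfl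

theorem pv_insertBy_front {α : Type} (b : α → α → Bool) (x : α) (l : List α)
    (h : ∀ z ∈ l, b x z = true) : PySem.List.insertBy b x l = x :: l := by
  cases l with
  | nil => rfl
  | cons z zs => rw [pv_insertBy_cons, if_pos (h z List.mem_cons_self)]

-- Filtering commutes with inserting x into a key-sorted list (stability of insertion).
theorem pv_filter_insertBy {α : Type} (key : α → Int) (p : α → Bool) (x : α)
    (ys : List α) (hys : ys.Pairwise (fun a b => key a ≤ key b)) :
    (PySem.List.insertBy (fun a b => decide (key a < key b)) x ys).filter p
      = if p x then PySem.List.insertBy (fun a b => decide (key a < key b)) x (ys.filter p)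
        else ys.filter p := by
  induction ys with
  | nil => by_cases hpx : p x <;> simp [PySem.List.insertBy, hpx]
  | cons y t ih =>
    rcases List.pairwise_cons.mp hys with ⟨hy, ht⟩
    rw [pv_insertBy_cons]
    by_cases hb : key x < key y
    · rw [if_pos (by simpa using hb)]
      by_cases hpx : p x
      · have hfront : PySem.List.insertBy (fun a b => decide (key a < key b)) x
            ((y :: t).filter p) = x :: (y :: t).filter p := by
          apply pv_insertBy_front
          intro z hz
          have hz' : z ∈ y :: t := List.mem_of_mem_filter hz
          have hyz : key y ≤ key z := by
            rcases List.mem_cons.mp hz' with h | h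
            · exact le_of_eq (congrArg key h.symm)
            · exact hy z h
          simpa using lt_of_lt_of_le hb hyz
        rw [if_pos hpx, hfront]
        simp [List.filter_cons, hpx]
      · simp [List.filter_cons, hpx]
    · rw [if_neg (by simpa using hb)]
      by_cases hpy : p y
      · by_cases hpx : p x <;>
          simp [hpy, hpx, ih ht, pv_insertBy_cons, hb]
      · by_cases hpx : p x <;> simp [hpy, hpx, ih ht]

-- insertBy preserves key-sortedness.
theorem pv_pairwise_insertBy {α : Type} (key : α → Int) (x : α)
    (ys : List α) (hys : ys.Pairwise (fun a b => key a ≤ key b)) :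
    (PySem.List.insertBy (fun a b => decide (key a < key b)) x ys).Pairwise
      (fun a b => key a ≤ key b) := by
  induction ys with
  | nil => simp [PySem.List.insertBy]
  | cons y t ih =>
    rcases List.pairwise_cons.mp hys with ⟨hy, ht⟩
    rw [pv_insertBy_cons]
    by_cases hb : key x < key y
    · rw [if_pos (by simpa using hb)]
      refine List.pairwise_cons.mpr ⟨?_, hys⟩
      intro a ha
      rcases List.mem_cons.mp ha with h | h
      · exact le_of_lt (h ▸ hb)
      · exact le_of_lt (lt_of_lt_of_le hb (hy a h))
    · rw [if_neg (by simpa using hb)]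
      refine List.pairwise_cons.mpr ⟨?_, ih ht⟩
      intro a ha
      rcases (PySem.List.mem_insertBy _ _ _ _).mp ha with h | h
      · exact h ▸ le_of_not_gt hb
      · exact hy a h

-- A STABLE sort commutes with filtering: sorting then keeping the p-elements is
-- sorting the p-elements (this is where B's single global sort meets A's per-group sorts).
theorem pv_filter_sorted {α : Type} (key : α → Int) (p : α → Bool) (xs : List α) :
    (PySem.List.sorted xs key).filter p = PySem.List.sorted (xs.filter p) key := by
  rw [PySem.List.sorted_eq_foldl_insertBy, PySem.List.sorted_eq_foldl_insertBy]
  suffices h : ∀ (acc : List α), acc.Pairwise (fun a b => key a ≤ key b) →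
      (xs.foldl (fun acc x => PySem.List.insertBy (fun a b => decide (key a < key b)) x acc) acc).filter p
        = (xs.filter p).foldl (fun acc x => PySem.List.insertBy (fun a b => decide (key a < key b)) x acc) (acc.filter p) by
    simpa using h [] (by simp)
  induction xs with
  | nil => intro acc _; simp
  | cons x t ih =>
    intro acc hacc
    rw [List.foldl_cons, List.filter_cons]
    by_cases hpx : p x
    · rw [if_pos hpx, List.foldl_cons, ih _ (pv_pairwise_insertBy key x acc hacc),
        pv_filter_insertBy key p x acc hacc, if_pos hpx]
    · rw [if_neg hpx, ih _ (pv_pairwise_insertBy key x acc hacc),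
        pv_filter_insertBy key p x acc hacc, if_neg hpx]

-- The grouping loop: getD at a status is the filter of the traversed list.
theorem pv_grp_getD (l : List (List (String × String)))
    (d : PySem.Dict String (List (List (String × String)))) (c : String) :
    (l.foldl (fun d t => d.modify (pvStatus t) [] (fun v => v ++ [t])) d).getD c []
      = d.getD c [] ++ l.filter (fun t => pvStatus t == c) := by
  have : l.foldl (fun d t => d.modify (pvStatus t) [] (fun v => v ++ [t])) d
      = (l.map (fun t => (pvStatus t, t))).foldl
          (fun d p => d.modify p.1 [] (fun v => v ++ [p.2])) d := by
    rw [List.foldl_map]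
  rw [this, PySem.Dict.getD_foldl_modify_append]
  congr 1
  rw [List.filter_map]
  simp [Function.comp_def]

-- The grouping loop: keys are the old ones updated by the statuses seen.
theorem pv_grp_keys (l : List (List (String × String)))
    (d : PySem.Dict String (List (List (String × String)))) :
    (l.foldl (fun d t => d.modify (pvStatus t) [] (fun v => v ++ [t])) d).keys
      = PySem.Set.update d.keys (l.map pvStatus) := by
  exact PySem.Dict.keys_foldl_modify_key l pvStatus [] (fun _ t => fun v => v ++ [t]) d

-- B's seeding loop: keys become the statuses in first-appearance order, values untouched.
theorem pv_seed_keys (l : List (List (String × String)))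
    (d : PySem.Dict String (List (List (String × String)))) :
    (l.foldl (fun d t => d.setdefault (pvStatus t) []) d).keys
      = PySem.Set.update d.keys (l.map pvStatus) := by
  induction l generalizing d with
  | nil => simp [PySem.Set.update_nil]
  | cons t ts ih =>
    rw [List.foldl_cons, ih, List.map_cons, PySem.Set.update_cons]
    congr 1
    rw [PySem.Dict.keys_setdefault, PySem.Set.add_eq_ite]
    by_cases hc : (PySem.Dict.contains d (pvStatus t)) = true
    · rw [if_pos hc, if_pos ((PySem.Dict.contains_iff_mem_keys d _).mp hc)]
    · rw [if_neg hc, if_neg (fun hm => hc ((PySem.Dict.contains_iff_mem_keys d _).mpr hm))]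

theorem pv_seed_getD (l : List (List (String × String)))
    (d : PySem.Dict String (List (List (String × String)))) (c : String) :
    (l.foldl (fun d t => d.setdefault (pvStatus t) []) d).getD c []
      = d.getD c [] := by
  induction l generalizing d with
  | nil => rfl
  | cons t ts ih =>
    rw [List.foldl_cons, ih]
    by_cases h : c = pvStatus t
    · rw [h]; exact PySem.Dict.getD_setdefault_self d (pvStatus t) [] []
    · rw [PySem.Dict.getD_eq_get?_getD, PySem.Dict.get?_setdefault_of_ne d [] h,
        ← PySem.Dict.getD_eq_get?_getD]

-- A's second loop: keys unchanged, each present key's value sorted.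
theorem pv_sortloop_keys (ks : List String)
    (d : PySem.Dict String (List (List (String × String)))) (h : ∀ s ∈ ks, s ∈ d.keys) :
    (ks.foldl (fun d s => d.modify s [] (fun v => PySem.List.sorted v pvPrio)) d).keys
      = d.keys := by
  induction ks generalizing d with
  | nil => rfl
  | cons k ks ih =>
    rw [List.foldl_cons]
    have hk : (d.modify k [] (fun v => PySem.List.sorted v pvPrio)).keys = d.keys := by
      rw [PySem.Dict.keys_modify, PySem.Dict.keys_insert_of_contains]
      exact (PySem.Dict.contains_iff_mem_keys d k).mpr (h k List.mem_cons_self)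
    rw [ih _ (fun s hs => hk ▸ h s (List.mem_cons_of_mem k hs)), hk]

theorem pv_sortloop_getD (ks : List String) (hk : ks.Nodup)
    (d : PySem.Dict String (List (List (String × String)))) (c : String) :
    (ks.foldl (fun d s => d.modify s [] (fun v => PySem.List.sorted v pvPrio)) d).getD c []
      = if c ∈ ks then PySem.List.sorted (d.getD c []) pvPrio else d.getD c [] := by
  induction ks generalizing d with
  | nil => simp
  | cons k ks ih =>
    rcases List.nodup_cons.mp hk with ⟨hknot, hnd⟩
    rw [List.foldl_cons, ih hnd, PySem.Dict.getD_modify]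
    by_cases hc : c ∈ ks
    · have hck : ¬ c = k := fun h => hknot (h ▸ hc)
      rw [if_pos hc, if_neg hck, if_pos (List.mem_cons_of_mem k hc)]
    · by_cases hck : c = k
      · rw [if_neg hc, if_pos hck, if_pos (List.mem_cons.mpr (Or.inl hck)), hck]
      · rw [if_neg hc, if_neg hck, if_neg (by simp [hck, hc])]

-- Both programs compute: for each status in first-appearance order, the priority-sorted
-- (resp. globally-sorted-then-filtered) tickets of that status.
theorem pv_eq (tickets : List (List (String × String))) :
    group_tickets_by_status tickets = group_tickets_by_status_alt tickets := by
  have hksA : (tickets.foldl (fun d t => d.modify (pvStatus t) [] (fun v => v ++ [t]))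
      PySem.Dict.empty).keys = PySem.Set.ofList (tickets.map pvStatus) := by
    rw [pv_grp_keys, PySem.Dict.keys_empty]
    exact PySem.Set.update_empty _
  have hnd : (PySem.Set.ofList (tickets.map pvStatus)).Nodup := PySem.Set.nodup_ofList _
  have hA : group_tickets_by_status tickets
      = (PySem.Set.ofList (tickets.map pvStatus)).map
          (fun s => (s, PySem.List.sorted (tickets.filter (fun t => pvStatus t == s)) pvPrio)) := by
    unfold group_tickets_by_status
    simp only []
    rw [PySem.Dict.items_eq_map_keys _ ?hn []]
    case hn =>
      rw [pv_sortloop_keys _ _ (fun s hs => hs), hksA]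
      exact hnd
    rw [pv_sortloop_keys _ _ (fun s hs => hs), hksA]
    apply List.map_congr_left
    intro s hs
    rw [pv_sortloop_getD _ (hksA ▸ hnd) _ s, if_pos (hksA ▸ hs), pv_grp_getD,
      PySem.Dict.getD_empty, List.nil_append]
  have hksS : (tickets.foldl (fun d t => d.setdefault (pvStatus t) [])
      (PySem.Dict.empty : PySem.Dict String (List (List (String × String))))).keys
      = PySem.Set.ofList (tickets.map pvStatus) := by
    rw [pv_seed_keys, PySem.Dict.keys_empty]
    exact PySem.Set.update_empty _
  have hksB : ((PySem.List.sorted tickets pvPrio).foldl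
      (fun d t => d.modify (pvStatus t) [] (fun v => v ++ [t]))
      (tickets.foldl (fun d t => d.setdefault (pvStatus t) [])
        (PySem.Dict.empty : PySem.Dict String (List (List (String × String)))))).keys
      = PySem.Set.ofList (tickets.map pvStatus) := by
    rw [pv_grp_keys, hksS, PySem.Set.update_eq_append_filter]
    have : List.filter (fun y => !(PySem.Set.ofList (tickets.map pvStatus)).contains y)
        (PySem.Set.ofList ((PySem.List.sorted tickets pvPrio).map pvStatus)) = [] := by
      rw [List.filter_eq_nil_iff]
      intro y hy
      have : y ∈ tickets.map pvStatus := by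
        rcases List.mem_map.mp ((PySem.Set.mem_ofList _ _).mp hy) with ⟨t, ht, rfl⟩
        exact List.mem_map.mpr ⟨t, (PySem.List.mem_sorted _ _ _ _).mp ht, rfl⟩
      simp [PySem.Set.mem_ofList, this]
    rw [this, List.append_nil]
  have hB : group_tickets_by_status_alt tickets
      = (PySem.Set.ofList (tickets.map pvStatus)).map
          (fun s => (s, (PySem.List.sorted tickets pvPrio).filter (fun t => pvStatus t == s))) := by
    unfold group_tickets_by_status_alt
    simp only []
    rw [PySem.Dict.items_eq_map_keys _ (hksB ▸ hnd) [], hksB]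
    apply List.map_congr_left
    intro s hs
    rw [pv_grp_getD, pv_seed_getD, PySem.Dict.getD_empty, List.nil_append]
  rw [hA, hB]
  apply List.map_congr_left
  intro s hs
  rw [pv_filter_sorted]

-- ===== VERDICT (by name: the statement is the Claim_ definition above) =====
theorem group_tickets_by_status_spec : Claim_equal_group_tickets_by_status := by
  intro tickets _
  unfold Spec_group_tickets_by_status
  exact pv_eq tickets
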